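-- pv_equiv track=rewrite | github.com/bigH/continuous-refactoring | src/continuous_refactoring/planning.py | _review_has_findings
-- ===== SOURCE A (Python) =====
-- def _review_has_findings(stdout: str) -> bool:
--     has_non_empty = False
--     for line in stdout.splitlines():
--         stripped = line.strip().lower()
--         if not stripped:
--             continue
--         has_non_empty = True
--         if "no findings" in stripped:
--             return False
--     return has_non_empty
-- ===== SOURCE B (Python) =====
-- def _review_has_findings(stdout: str) -> bool:
--     if "no findings" in stdout.lower():
--         return False
--     return bool(stdout.strip())
-- ===== Notes on version B (the rewrite author's own statement) =====
-- stated objective: simpler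
-- what changed: Replaced A's line-by-line loop (splitlines, per-line strip/lower, early-exit accumulator) by two whole-string operations: a single substring search in the lowered text and an emptiness test of the stripped text; correct because the searched pattern contains no line-break character (an occurrence cannot cross a line boundary) and all line-break characters are whitespace (stripping the whole string sees exactly the lines' non-space characters).
import Mathlib
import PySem

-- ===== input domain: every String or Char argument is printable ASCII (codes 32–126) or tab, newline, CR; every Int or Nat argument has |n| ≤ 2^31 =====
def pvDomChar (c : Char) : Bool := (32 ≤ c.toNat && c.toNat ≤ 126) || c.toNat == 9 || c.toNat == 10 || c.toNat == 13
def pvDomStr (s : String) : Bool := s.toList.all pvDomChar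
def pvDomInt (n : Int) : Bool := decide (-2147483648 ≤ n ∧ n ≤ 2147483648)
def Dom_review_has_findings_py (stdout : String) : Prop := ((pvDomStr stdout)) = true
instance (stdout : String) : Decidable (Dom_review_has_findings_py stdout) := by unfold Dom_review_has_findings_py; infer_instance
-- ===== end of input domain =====

-- B replaces A's line-by-line loop (splitlines + per-line strip/lower + early-exit
-- accumulator) by two whole-string operations: one substring search in the lowered
-- text and one emptiness test of the stripped text (simpler; same cost).

-- ===== PORT A =====
-- A's loop with its early return and the has_non_empty accumulator
def pvALoop : List String → Bool → Bool
  | [], acc => acc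
  | l :: rest, acc =>
    let stripped := PySem.Str.lower (PySem.Str.strip l)
    if PySem.Str.len stripped == 0 then pvALoop rest acc
    else if PySem.Str.isIn "no findings" stripped then false
    else pvALoop rest true

def review_has_findings_py (stdout : String) : Bool :=
  pvALoop (PySem.Str.splitlines stdout) false

-- ===== PORT B =====
def review_has_findings_py_alt (stdout : String) : Bool :=
  if PySem.Str.isIn "no findings" (PySem.Str.lower stdout) then false
  else !(PySem.Str.len (PySem.Str.strip stdout) == 0)

-- ===== PRECONDITION & SPEC =====
def Spec_review_has_findings_py (stdout : String) (out : Bool) : Prop := out = review_has_findings_py_alt stdout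
instance (stdout : String) (out : Bool) : Decidable (Spec_review_has_findings_py stdout out) := by unfold Spec_review_has_findings_py; infer_instance

-- ===== CLAIM (what is proved, stated in full; the proofs are below) =====
def Claim_equal_review_has_findings_py : Prop := ∀ (stdout : String), Dom_review_has_findings_py stdout → Spec_review_has_findings_py stdout (review_has_findings_py stdout)

-- ===== LEMMAS AND PROOFS =====

-- the search pattern, as a character list
def pvPat : List Char := ['n', 'o', ' ', 'f', 'i', 'n', 'd', 'i', 'n', 'g', 's']

theorem pvPatToList : "no findings".toList = pvPat := by decide

theorem pvCharEq (c : Char) (n : Nat) (h : c.toNat = n) (d : Char) (hd : d.toNat = n) : c = d :=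
  Char.ext (UInt32.toNat_inj.mp (h.trans hd.symm))

-- every line-break character splitlines recognises is whitespace, is its own
-- lowercase, and does not occur in the pattern
theorem pvIsBProps (c : Char)
    (hc : (decide (c.toNat = 10) || decide (c.toNat = 13) || decide (c.toNat = 11) ||
      decide (c.toNat = 12) || decide (c.toNat = 28) || decide (c.toNat = 29) ||
      decide (c.toNat = 30) || decide (c.toNat = 133) || decide (c.toNat = 8232) ||
      decide (c.toNat = 8233)) = true) :
    PySem.Chars.isspace c = true ∧ PySem.Chars.lowerChar c = c ∧ c ∉ pvPat := by
  simp only [Bool.or_eq_true, decide_eq_true_eq] at hc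
  have hch : c = '\n' ∨ c = '\r' ∨ c = '\x0b' ∨ c = '\x0c' ∨ c = '\x1c' ∨ c = '\x1d' ∨
      c = '\x1e' ∨ c = '\x85' ∨ c = '\u2028' ∨ c = '\u2029' := by
    rcases hc with (((((((((h | h) | h) | h) | h) | h) | h) | h) | h) | h)
    · exact Or.inl (pvCharEq c 10 h '\n' (by decide))
    · exact Or.inr (Or.inl (pvCharEq c 13 h '\r' (by decide)))
    · exact Or.inr (Or.inr (Or.inl (pvCharEq c 11 h '\x0b' (by decide))))
    · exact Or.inr (Or.inr (Or.inr (Or.inl (pvCharEq c 12 h '\x0c' (by decide)))))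
    · exact Or.inr (Or.inr (Or.inr (Or.inr (Or.inl (pvCharEq c 28 h '\x1c' (by decide))))))
    · exact Or.inr (Or.inr (Or.inr (Or.inr (Or.inr (Or.inl (pvCharEq c 29 h '\x1d' (by decide)))))))
    · exact Or.inr (Or.inr (Or.inr (Or.inr (Or.inr (Or.inr (Or.inl (pvCharEq c 30 h '\x1e' (by decide))))))))
    · exact Or.inr (Or.inr (Or.inr (Or.inr (Or.inr (Or.inr (Or.inr (Or.inl (pvCharEq c 133 h '\x85' (by decide)))))))))
    · exact Or.inr (Or.inr (Or.inr (Or.inr (Or.inr (Or.inr (Or.inr (Or.inr (Or.inl (pvCharEq c 8232 h '\u2028' (by decide))))))))))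
    · exact Or.inr (Or.inr (Or.inr (Or.inr (Or.inr (Or.inr (Or.inr (Or.inr (Or.inr (pvCharEq c 8233 h '\u2029' (by decide))))))))))
  rcases hch with rfl | rfl | rfl | rfl | rfl | rfl | rfl | rfl | rfl | rfl <;>
    exact ⟨by decide, by decide, by decide⟩

-- a prefix of u ++ b :: v avoiding b is a prefix of u
theorem pvPrefixAppendCons (p u v : List Char) (b : Char) (hb : b ∉ p)
    (h : p <+: u ++ b :: v) : p <+: u := by
  have hlen : p.length ≤ u.length := by
    by_contra hgt
    push_neg at hgt
    have hu : u.length < (u ++ b :: v).length := by simp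
    have hget : (u ++ b :: v)[u.length] = b := by
      rw [List.getElem_append_right (le_refl u.length)]
      simp
    have hp : p[u.length]'(by omega) = (u ++ b :: v)[u.length] := List.IsPrefix.getElem h _
    exact hb (hget ▸ hp ▸ List.getElem_mem _)
  have := List.prefix_iff_eq_take.mp h
  rw [List.take_append_of_le_length hlen] at this
  exact this ▸ List.take_prefix _ _
theorem pvInfixAppendCons (p u v : List Char) (b : Char) (hp : p ≠ []) (hb : b ∉ p) :
    p <:+: u ++ b :: v ↔ (p <:+: u ∨ p <:+: v) := by
  constructor
  · intro h
    induction u with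
    | nil =>
      rcases List.infix_cons_iff.mp h with hpre | hinf
      · rcases p with _ | ⟨a, t⟩
        · exact absurd rfl hp
        · rcases List.cons_prefix_cons.mp hpre with ⟨rfl, _⟩
          exact absurd List.mem_cons_self hb
      · exact Or.inr hinf
    | cons a u' ih =>
      rcases List.infix_cons_iff.mp h with hpre | hinf
      · exact Or.inl (pvPrefixAppendCons p (a :: u') v b hb hpre).isInfix
      · rcases ih hinf with h1 | h2
        · exact Or.inl (List.infix_cons_iff.mpr (Or.inr h1))
        · exact Or.inr h2
  · intro h
    rcases h with h | h
    · exact h.trans (List.prefix_append u (b :: v)).isInfix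
    · exact h.trans ((List.suffix_cons b v).trans (List.suffix_append u (b :: v))).isInfix

-- a pattern whose first character is not whitespace survives left-stripping
theorem pvInfixDropWhile (a : Char) (t x : List Char) (ha : PySem.Chars.isspace a = false) :
    (a :: t) <:+: List.dropWhile PySem.Chars.isspace x ↔ (a :: t) <:+: x := by
  constructor
  · intro h
    exact h.trans (List.dropWhile_suffix _).isInfix
  · intro h
    induction x with
    | nil => simpa using h
    | cons c rest ih =>
      by_cases hc : PySem.Chars.isspace c = true
      · rw [List.dropWhile_cons_of_pos hc]
        rcases List.infix_cons_iff.mp h with hpre | hinf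
        · rcases List.cons_prefix_cons.mp hpre with ⟨rfl, _⟩
          rw [ha] at hc; exact absurd hc (by simp)
        · exact ih hinf
      · rw [List.dropWhile_cons_of_neg hc]
        exact h

theorem pvInfixLstrip (x : List Char) :
    pvPat <:+: PySem.Chars.lstrip x ↔ pvPat <:+: x := by
  show pvPat <:+: List.dropWhile PySem.Chars.isspace x ↔ pvPat <:+: x
  exact pvInfixDropWhile 'n' _ x (by decide)

theorem pvInfixRstrip (x : List Char) :
    pvPat <:+: PySem.Chars.rstrip x ↔ pvPat <:+: x := by
  show pvPat <:+: (List.dropWhile PySem.Chars.isspace x.reverse).reverse ↔ pvPat <:+: x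
  rw [← List.reverse_infix, List.reverse_reverse, ← List.reverse_infix (l₁ := pvPat) (l₂ := x)]
  rw [show pvPat.reverse = 's' :: ['g', 'n', 'i', 'd', 'n', 'i', 'f', ' ', 'o', 'n'] from by decide]
  exact pvInfixDropWhile 's' _ x.reverse (by decide)

theorem pvInfixStrip (x : List Char) :
    pvPat <:+: PySem.Chars.strip x ↔ pvPat <:+: x := by
  show pvPat <:+: PySem.Chars.rstrip (PySem.Chars.lstrip x) ↔ _
  rw [pvInfixRstrip, pvInfixLstrip]

theorem pvIsInStrip (x : List Char) :
    PySem.Chars.isIn pvPat (PySem.Chars.strip x) = PySem.Chars.isIn pvPat x := by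
  rw [Bool.eq_iff_iff, PySem.Chars.isIn_iff_infix, PySem.Chars.isIn_iff_infix]
  exact pvInfixStrip x

-- lowering a character does not change whether it is whitespace
theorem pvIsspaceLower (c : Char) :
    PySem.Chars.isspace (PySem.Chars.lowerChar c) = PySem.Chars.isspace c := by
  unfold PySem.Chars.lowerChar
  by_cases hu : PySem.Chars.isupper c = true
  · rw [if_pos hu]
    have hb : 65 ≤ c.toNat ∧ c.toNat ≤ 90 := by
      unfold PySem.Chars.isupper at hu
      simp only [Bool.and_eq_true, decide_eq_true_eq, Char.le_def, UInt32.le_iff_toNat_le] at hu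
      have h1 : ('A' : Char).val.toNat = 65 := by decide
      have h2 : ('Z' : Char).val.toNat = 90 := by decide
      exact ⟨h1 ▸ hu.1, h2 ▸ hu.2⟩
    have hofn : (Char.ofNat (c.toNat + 32)).toNat = c.toNat + 32 := by
      unfold Char.ofNat
      rw [dif_pos (Or.inl (show c.toNat + 32 < 55296 by omega) : (c.toNat + 32).isValidChar)]
      exact Char.toNat_ofNatAux _
    unfold PySem.Chars.isspace
    rw [Bool.eq_iff_iff]
    simp only [hofn, Bool.or_eq_true, Bool.and_eq_true, decide_eq_true_eq]
    omega
  · rw [if_neg hu]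

theorem pvLowerStrip (l : List Char) :
    PySem.Chars.lower (PySem.Chars.strip l) = PySem.Chars.strip (PySem.Chars.lower l) := by
  have hps : (PySem.Chars.isspace ∘ PySem.Chars.lowerChar) = PySem.Chars.isspace :=
    funext fun c => pvIsspaceLower c
  show List.map _ (PySem.Chars.rstrip (PySem.Chars.lstrip l)) =
    PySem.Chars.rstrip (PySem.Chars.lstrip (List.map _ l))
  unfold PySem.Chars.rstrip PySem.Chars.lstrip
  rw [List.dropWhile_map, hps, ← List.map_reverse, List.dropWhile_map, hps, List.map_reverse]

theorem pvStripNilIff (l : List Char) :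
    PySem.Chars.strip l = [] ↔ ∀ c ∈ l, PySem.Chars.isspace c = true := by
  show PySem.Chars.rstrip (PySem.Chars.lstrip l) = [] ↔ _
  unfold PySem.Chars.rstrip PySem.Chars.lstrip
  rw [List.reverse_eq_nil_iff, List.dropWhile_eq_nil_iff]
  constructor
  · intro h c hc
    rw [← List.takeWhile_append_dropWhile (p := PySem.Chars.isspace) (l := l)] at hc
    rcases List.mem_append.mp hc with h1 | h2
    · exact List.mem_takeWhile_imp h1
    · exact h c (List.mem_reverse.mpr h2)
  · intro h c hc
    exact h c ((List.dropWhile_sublist _).subset (List.mem_reverse.mp hc))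

-- the bodies of A's two line predicates, as whole-line facts
theorem pvLinePat (lc : List Char) :
    PySem.Chars.isIn pvPat (PySem.Chars.lower (PySem.Chars.strip lc)) =
    PySem.Chars.isIn pvPat (PySem.Chars.lower lc) := by
  rw [pvLowerStrip, pvIsInStrip]

theorem pvLineNonempty (lc : List Char) :
    (!((PySem.Chars.strip lc).length == 0)) = lc.any (fun c => !PySem.Chars.isspace c) := by
  rw [Bool.eq_iff_iff]
  simp only [Bool.not_eq_eq_eq_not, Bool.not_true, beq_eq_false_iff_ne, ne_eq,
    List.length_eq_zero_iff, List.any_eq_true, Bool.not_eq_true']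
  rw [pvStripNilIff]
  push_neg
  simp [Bool.not_eq_true]

theorem pvLineNonemptyInt (lc : List Char) :
    (!((((PySem.Chars.strip lc).length : Int)) == 0)) = lc.any (fun c => !PySem.Chars.isspace c) := by
  have hc : ((((PySem.Chars.strip lc).length : Int)) == 0) = ((PySem.Chars.strip lc).length == 0) := by
    rw [Bool.eq_iff_iff]
    simp
  rw [hc, pvLineNonempty]

-- splitlines never lets the pattern cross a line boundary: "some line contains
-- the pattern" is "the whole text contains the pattern"
theorem pvInfixBreak (b : Char) (hbs : PySem.Chars.lowerChar b = b) (hbp : b ∉ pvPat)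
    (u v : List Char) :
    PySem.Chars.isIn pvPat (PySem.Chars.lower (u ++ b :: v)) =
    (PySem.Chars.isIn pvPat (PySem.Chars.lower u) || PySem.Chars.isIn pvPat (PySem.Chars.lower v)) := by
  have hl : PySem.Chars.lower (u ++ b :: v) = PySem.Chars.lower u ++ b :: PySem.Chars.lower v := by
    simp [PySem.Chars.lower, hbs]
  rw [hl, Bool.eq_iff_iff]
  simp only [Bool.or_eq_true, PySem.Chars.isIn_iff_infix]
  exact pvInfixAppendCons pvPat _ _ b (by decide) hbp

theorem pvGoNonempty (isB : Char → Bool)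
    (hB : ∀ c, isB c = true → PySem.Chars.isspace c = true) :
    ∀ (n : Nat) (s : List Char), s.length ≤ n → ∀ (cur : List Char) (acc : List (List Char)),
    (PySem.Chars.splitlines.go isB s cur acc).any
        (fun l => l.any (fun c => !PySem.Chars.isspace c)) =
      (acc.reverse.any (fun l => l.any (fun c => !PySem.Chars.isspace c)) ||
        (cur.reverse ++ s).any (fun c => !PySem.Chars.isspace c)) := by
  intro n
  induction n with
  | zero =>
    intro s hs cur acc
    have hnil : s = [] := List.length_eq_zero_iff.mp (Nat.le_zero.mp hs)
    subst hnil
    rw [PySem.Chars.splitlines.go.eq_def]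
    by_cases hcur : cur.isEmpty
    · have hc : cur = [] := List.isEmpty_iff.mp hcur
      subst hc
      simp
    · simp only [hcur, Bool.false_eq_true, if_false]
      simp [List.any_append]
  | succ n ih =>
    intro s hs cur acc
    rw [PySem.Chars.splitlines.go.eq_def]
    split
    · by_cases hcur : cur.isEmpty
      · have hc : cur = [] := List.isEmpty_iff.mp hcur
        subst hc
        simp
      · simp only [hcur, Bool.false_eq_true, if_false]
        simp [List.any_append]
    · next rest =>
      rw [ih rest (by simp at hs; omega) [] (cur.reverse :: acc)]
      have h1 : PySem.Chars.isspace '\r' = true := by decide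
      have h2 : PySem.Chars.isspace '\n' = true := by decide
      simp only [List.reverse_cons, List.any_append, List.any_cons, List.any_nil,
        List.reverse_nil, List.nil_append, h1, h2, Bool.not_true, Bool.or_false,
        Bool.false_or, Bool.or_assoc]
    · next _ _ _ c rest _ =>
      split
      · next hc =>
        rw [ih rest (by simp at hs; omega) [] (cur.reverse :: acc)]
        simp only [List.reverse_cons, List.any_append, List.any_cons, List.any_nil,
          List.reverse_nil, List.nil_append, hB c hc, Bool.not_true, Bool.or_false,
          Bool.false_or, Bool.or_assoc]
      · rw [ih rest (by simp at hs; omega) (c :: cur) acc]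
        rw [List.reverse_cons, List.append_assoc]
        rfl

theorem pvGoAny (isB : Char → Bool)
    (hB : ∀ c, isB c = true → PySem.Chars.isspace c = true ∧ PySem.Chars.lowerChar c = c ∧ c ∉ pvPat) :
    ∀ (n : Nat) (s : List Char), s.length ≤ n → ∀ (cur : List Char) (acc : List (List Char)),
    (PySem.Chars.splitlines.go isB s cur acc).any
        (fun l => PySem.Chars.isIn pvPat (PySem.Chars.lower l)) =
      (acc.reverse.any (fun l => PySem.Chars.isIn pvPat (PySem.Chars.lower l)) ||
        PySem.Chars.isIn pvPat (PySem.Chars.lower (cur.reverse ++ s))) := by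
  intro n
  induction n with
  | zero =>
    intro s hs cur acc
    have hnil : s = [] := List.length_eq_zero_iff.mp (Nat.le_zero.mp hs)
    subst hnil
    cases cur with
    | nil =>
      rw [show PySem.Chars.splitlines.go isB [] [] acc = acc.reverse from rfl]
      have hemp : PySem.Chars.isIn pvPat (PySem.Chars.lower (List.reverse ([] : List Char) ++ [])) = false := by decide
      rw [hemp, Bool.or_false]
    | cons a t =>
      rw [show PySem.Chars.splitlines.go isB [] (a :: t) acc = ((a :: t).reverse :: acc).reverse from rfl]
      simp [List.any_append]
  | succ n ih =>
    intro s hs cur acc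
    rw [PySem.Chars.splitlines.go.eq_def]
    split
    · by_cases hcur : cur.isEmpty
      · have hc : cur = [] := List.isEmpty_iff.mp hcur
        subst hc
        rw [if_pos hcur]
        have hemp : PySem.Chars.isIn pvPat (PySem.Chars.lower (List.reverse ([] : List Char) ++ [])) = false := by decide
        rw [hemp, Bool.or_false]
      · simp only [hcur, Bool.false_eq_true, if_false]
        simp [List.any_append]
    · next rest =>
      rw [ih rest (by simp at hs; omega) [] (cur.reverse :: acc)]
      rw [show cur.reverse ++ '\r' :: '\n' :: rest = cur.reverse ++ '\r' :: ([] ++ '\n' :: rest) from rfl]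
      rw [pvInfixBreak '\r' (by decide) (by decide), pvInfixBreak '\n' (by decide) (by decide)]
      have hemp : PySem.Chars.isIn pvPat (PySem.Chars.lower []) = false := by decide
      simp only [List.reverse_cons, List.any_append, List.any_cons, List.any_nil,
        List.reverse_nil, List.nil_append, hemp, Bool.or_false, Bool.false_or, Bool.or_assoc]
    · next _ _ _ c rest _ =>
      split
      · next hc =>
        rw [ih rest (by simp at hs; omega) [] (cur.reverse :: acc)]
        rw [pvInfixBreak c (hB c hc).2.1 (hB c hc).2.2]
        simp only [List.reverse_cons, List.any_append, List.any_cons, List.any_nil,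
          List.reverse_nil, List.nil_append, Bool.or_false, Bool.false_or, Bool.or_assoc]
      · rw [ih rest (by simp at hs; omega) (c :: cur) acc]
        rw [List.reverse_cons, List.append_assoc]
        rfl

theorem pvSplitAny (s : List Char) :
    (PySem.Chars.splitlines s).any (fun l => PySem.Chars.isIn pvPat (PySem.Chars.lower l)) =
      PySem.Chars.isIn pvPat (PySem.Chars.lower s) := by
  show (PySem.Chars.splitlines.go _ s [] []).any _ = _
  rw [pvGoAny _ (fun c hc => pvIsBProps c hc) s.length s (le_refl _) [] []]
  simp

theorem pvSplitNonempty (s : List Char) :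
    (PySem.Chars.splitlines s).any (fun l => l.any (fun c => !PySem.Chars.isspace c)) =
      s.any (fun c => !PySem.Chars.isspace c) := by
  show (PySem.Chars.splitlines.go _ s [] []).any _ = _
  rw [pvGoNonempty _ (fun c hc => (pvIsBProps c hc).1) s.length s (le_refl _) [] []]
  simp

-- a nonempty pattern is not contained in the empty string
theorem pvIsIn_empty (l : String) (h : l.toList = []) :
    PySem.Str.isIn "no findings" l = false := by
  rw [PySem.Str.isIn_eq, h]
  decide

-- A's early-exit loop as two scans over the cleaned lines
theorem pvALoop_eq (ls : List String) (acc : Bool) :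
    pvALoop ls acc =
      (if (ls.map (fun l => PySem.Str.lower (PySem.Str.strip l))).any
            (fun l => PySem.Str.isIn "no findings" l) then false
       else acc || (ls.map (fun l => PySem.Str.lower (PySem.Str.strip l))).any
            (fun l => !(PySem.Str.len l == 0))) := by
  induction ls generalizing acc with
  | nil => simp [pvALoop]
  | cons l rest ih =>
    rw [show pvALoop (l :: rest) acc = (let stripped := PySem.Str.lower (PySem.Str.strip l);
      if PySem.Str.len stripped == 0 then pvALoop rest acc
      else if PySem.Str.isIn "no findings" stripped then false
      else pvALoop rest true) from rfl]
    simp only [List.map_cons, List.any_cons]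
    by_cases hlen : PySem.Str.len (PySem.Str.lower (PySem.Str.strip l)) == 0
    · have hnil : (PySem.Str.lower (PySem.Str.strip l)).toList = [] := by
        have h := hlen
        rw [PySem.Str.len_eq, beq_iff_eq] at h
        have h2 : (PySem.Str.lower (PySem.Str.strip l)).toList.length = 0 := by exact_mod_cast h
        exact List.length_eq_zero_iff.mp h2
      rw [if_pos hlen, ih, pvIsIn_empty _ hnil, hlen]
      simp
    · rw [if_neg hlen]
      by_cases hin : PySem.Str.isIn "no findings" (PySem.Str.lower (PySem.Str.strip l)) = true
      · rw [if_pos hin, hin]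
        simp
      · rw [if_neg hin, ih]
        rw [Bool.not_eq_true] at hin
        rw [hin]
        simp only [Bool.false_or, Bool.true_or]
        rw [Bool.not_eq_true] at hlen
        rw [hlen]
        simp [Bool.or_comm]

-- A's "some cleaned line contains the pattern" is B's whole-string search
theorem pvStrCond (s : String) :
    ((PySem.Str.splitlines s).map (fun l => PySem.Str.lower (PySem.Str.strip l))).any
      (fun l => PySem.Str.isIn "no findings" l) =
    PySem.Str.isIn "no findings" (PySem.Str.lower s) := by
  rw [List.any_map]
  have h1 : ∀ l : String, ((fun l => PySem.Str.isIn "no findings" l) ∘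
      (fun l => PySem.Str.lower (PySem.Str.strip l))) l =
      ((fun lc => PySem.Chars.isIn pvPat (PySem.Chars.lower lc)) ∘ String.toList) l := by
    intro l
    simp only [Function.comp_apply]
    rw [PySem.Str.isIn_eq, pvPatToList, PySem.Str.toList_lower, PySem.Str.toList_strip]
    exact pvLinePat l.toList
  rw [List.any_congr rfl h1, ← List.any_map, PySem.Str.splitlines_map_toList, pvSplitAny,
    PySem.Str.isIn_eq, pvPatToList, PySem.Str.toList_lower]

-- A's "some cleaned line is non-empty" is B's emptiness test of the stripped string
theorem pvStrNe (s : String) :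
    ((PySem.Str.splitlines s).map (fun l => PySem.Str.lower (PySem.Str.strip l))).any
      (fun l => !(PySem.Str.len l == 0)) =
    (!(PySem.Str.len (PySem.Str.strip s) == 0)) := by
  rw [List.any_map]
  have h1 : ∀ l : String, ((fun l => !(PySem.Str.len l == 0)) ∘
      (fun l => PySem.Str.lower (PySem.Str.strip l))) l =
      ((fun lc => lc.any (fun c => !PySem.Chars.isspace c)) ∘ String.toList) l := by
    intro l
    simp only [Function.comp_apply]
    rw [PySem.Str.len_eq, PySem.Str.toList_lower, PySem.Str.toList_strip]
    have hlow : (PySem.Chars.lower (PySem.Chars.strip l.toList)).length =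
        (PySem.Chars.strip l.toList).length := by simp [PySem.Chars.lower]
    rw [hlow, pvLineNonemptyInt]
  rw [List.any_congr rfl h1, ← List.any_map, PySem.Str.splitlines_map_toList, pvSplitNonempty,
    PySem.Str.len_eq, PySem.Str.toList_strip, pvLineNonemptyInt]

-- ===== VERDICT (by name: the statement is the Claim_ definition above) =====
theorem review_has_findings_py_spec : Claim_equal_review_has_findings_py := by
  intro stdout _
  unfold Spec_review_has_findings_py review_has_findings_py review_has_findings_py_alt
  rw [pvALoop_eq, pvStrCond, pvStrNe]
  simp only [Bool.false_or]
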